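-- pv_equiv track=rewrite | github.com/mightyelf13/python_scripts | chessboard.py | count_tile_positions
-- ===== SOURCE A (Python) =====
-- def count_tile_positions(N, M, board):
--     positions_count = 0
--
--     for row in board:
--         consecutive_empty = 0
--
--         for square in row:
--             if square == 0:
--                 consecutive_empty += 1
--             else:
--                 positions_count += max(0, consecutive_empty - N + 1)
--                 consecutive_empty = 0
--
--         positions_count += max(0, consecutive_empty - N + 1)
--
--     for col in range(M):
--         consecutive_empty = 0
--
--         for row in board:
--             if row[col] == 0:
--                 consecutive_empty += 1
--             else:
--                 positions_count += max(0, consecutive_empty - N + 1)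
--                 consecutive_empty = 0
--
--         positions_count += max(0, consecutive_empty - N + 1)
--
--     return positions_count
-- ===== SOURCE B (Python) =====
-- def _line_count(N, line):
--     # prefix[k] = number of occupied squares among the first k; a length-N window
--     # starting at i is free iff prefix[i + N] == prefix[i].
--     prefix = [0]
--     for sq in line:
--         prefix.append(prefix[-1] + (1 if sq != 0 else 0))
--     return sum(1 for i in range(len(line) - N + 1) if prefix[i + N] == prefix[i])
--
--
-- def count_tile_positions(N, M, board):
--     total = 0
--     for row in board:
--         total += _line_count(N, row)
--     for c in range(M):
--         total += _line_count(N, [row[c] for row in board])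
--     return total
-- ===== Notes on version B (the rewrite author's own statement) =====
-- stated objective: alternative
-- what changed: Replaces A's running-counter-with-flush over each row/column by a prefix-sum pass per line that counts the free length-N windows directly (a window [i,i+N) is free iff prefix[i+N]==prefix[i]), with a single shared helper applied to rows and to columns built by comprehension.
-- outside the precondition, e.g. on count_tile_positions(-1, 0, [[0]]): A returns 3, B raises IndexError
import Mathlib
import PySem

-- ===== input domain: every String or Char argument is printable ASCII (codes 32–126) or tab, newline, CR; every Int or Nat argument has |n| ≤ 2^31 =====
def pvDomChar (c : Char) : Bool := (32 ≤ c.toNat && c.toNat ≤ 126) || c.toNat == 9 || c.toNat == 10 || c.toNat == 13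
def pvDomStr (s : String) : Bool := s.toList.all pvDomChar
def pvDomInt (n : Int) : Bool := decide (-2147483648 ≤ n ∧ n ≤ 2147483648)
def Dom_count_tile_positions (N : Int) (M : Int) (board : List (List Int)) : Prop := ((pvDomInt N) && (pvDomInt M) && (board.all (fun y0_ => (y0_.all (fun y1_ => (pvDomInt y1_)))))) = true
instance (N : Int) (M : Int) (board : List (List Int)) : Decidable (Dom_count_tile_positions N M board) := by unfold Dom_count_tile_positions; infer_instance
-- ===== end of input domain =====

-- B replaces A's flush-on-nonzero running counter by a pfx-sum window count per line
-- (objective: alternative algorithm of the same cost).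

-- ===== PORT A =====
-- the body of A's inner loops (same branch order as the Python)
def stepA (N : Int) (s : Int × Int) (sq : Int) : Int × Int :=
  if sq == 0 then (s.1, s.2 + 1) else (s.1 + max 0 (s.2 - N + 1), 0)

def count_tile_positions (N : Int) (M : Int) (board : List (List Int)) : Int :=
  let p1 : Int := board.foldl (fun (p : Int) row =>
      let s := row.foldl (stepA N) (p, 0)
      s.1 + max 0 (s.2 - N + 1)) 0
  (PySem.List.pyRange 0 M 1).foldl (fun (p : Int) col =>
      let s := board.foldl (fun (s : Int × Int) row => stepA N s (PySem.List.pyGetD row col 0)) (p, 0)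
      s.1 + max 0 (s.2 - N + 1)) p1

-- ===== PORT B =====
-- pfx[k] = occupied squares among the first k; window [i, i+N) free iff pfx[i+N] == pfx[i]
def lineCountAlt (N : Int) (line : List Int) : Int :=
  let pfx : List Int := line.foldl
      (fun (pr : List Int) sq => pr ++ [PySem.List.pyGetD pr (-1) 0 + (if sq ≠ 0 then 1 else 0)]) [0]
  ((PySem.List.pyRange 0 ((line.length : Int) - N + 1) 1).countP
      (fun i => PySem.List.pyGetD pfx (i + N) 0 == PySem.List.pyGetD pfx i 0) : Int)

def count_tile_positions_alt (N : Int) (M : Int) (board : List (List Int)) : Int :=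
  let t1 : Int := board.foldl (fun (t : Int) row => t + lineCountAlt N row) 0
  (PySem.List.pyRange 0 M 1).foldl
      (fun (t : Int) c => t + lineCountAlt N (board.map (fun row => PySem.List.pyGetD row c 0))) t1

-- ===== PRECONDITION & SPEC =====
-- Pre_ excludes (a) boards with a row shorter than M (A raises IndexError there) and
-- (b) negative tile length N, outside the task's natural domain (A returns counts of
-- phantom negative-length tiles there while B's pfx-index scan raises IndexError).
def Pre_count_tile_positions (N : Int) (M : Int) (board : List (List Int)) : Prop :=
  0 ≤ N ∧ (M ≤ 0 ∨ ∀ row ∈ board, M ≤ (row.length : Int))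
instance (N : Int) (M : Int) (board : List (List Int)) : Decidable (Pre_count_tile_positions N M board) := by
  unfold Pre_count_tile_positions; infer_instance

def pvWitness_count_tile_positions : Int × Int × List (List Int) := (2, 2, [[0, 0], [0, 1]])

def Spec_count_tile_positions (N : Int) (M : Int) (board : List (List Int)) (out : Int) : Prop :=
  out = count_tile_positions_alt N M board
instance (N : Int) (M : Int) (board : List (List Int)) (out : Int) : Decidable (Spec_count_tile_positions N M board out) := by
  unfold Spec_count_tile_positions; infer_instance

-- ===== CLAIM (what is proved, stated in full; the proofs are below) =====
def Claim_equal_count_tile_positions : Prop := ∀ (N : Int) (M : Int) (board : List (List Int)), Dom_count_tile_positions N M board → Pre_count_tile_positions N M board → Spec_count_tile_positions N M board (count_tile_positions N M board)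

-- ===== LEMMAS AND PROOFS =====

-- number of trailing zeros of a line (A's counter at the end of the line)
def tz (l : List Int) : Nat := (l.reverse.takeWhile (fun x => x == 0)).length

-- the common specification: number of all-zero length-(N.toNat) windows
def Wc (Nn : Nat) (line : List Int) : Int :=
  ((List.range (line.length + 1 - Nn)).countP
      (fun k => ((line.drop k).take Nn).all (fun x => x == 0)) : Nat)

lemma foldl_stepA_shift (N : Int) (line : List Int) : ∀ (p c : Int),
    line.foldl (stepA N) (p, c) =
      (p + (line.foldl (stepA N) (0, c)).1, (line.foldl (stepA N) (0, c)).2) := by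
  induction line with
  | nil => intro p c; simp
  | cons x xs ih =>
      intro p c
      simp only [List.foldl_cons, stepA]
      by_cases h : (x == 0) = true
      · simp only [if_pos h]
        exact ih p (c + 1)
      · simp only [if_neg h]
        rw [ih (p + max 0 (c - N + 1)) 0, ih (0 + max 0 (c - N + 1)) 0]
        simp [Prod.ext_iff]; omega

lemma tz_append (l : List Int) (x : Int) : tz (l ++ [x]) = if x == 0 then tz l + 1 else 0 := by
  by_cases h : x == 0 <;> simp [tz, h]

lemma all_take_iff_takeWhile (p : Int → Bool) : ∀ (r : List Int) (k : Nat), k ≤ r.length →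
    ((r.take k).all p = decide (k ≤ (r.takeWhile p).length))
  | r, 0, _ => by simp
  | [], k + 1, h => by simp at h
  | x :: xs, k + 1, h => by
      by_cases hx : p x = true
      · simp only [List.take_succ_cons, List.all_cons, hx, Bool.true_and,
          List.takeWhile_cons_of_pos hx, List.length_cons]
        rw [all_take_iff_takeWhile p xs k (by simpa using h)]
        simp
      · simp [List.takeWhile_cons_of_neg (by simpa using hx), hx]

lemma all_drop_iff_tz (l : List Int) (k : Nat) (hk : k ≤ l.length) :
    ((l.drop (l.length - k)).all (fun x => x == 0)) = (decide (k ≤ tz l)) := by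
  have hd : l.drop (l.length - k) = (l.reverse.take k).reverse := by
    rw [List.take_reverse]; simp
  rw [hd, List.all_reverse, tz]
  exact all_take_iff_takeWhile _ l.reverse k (by simpa using hk)

lemma Wc_append (Nn : Nat) (l : List Int) (x : Int) :
    Wc Nn (l ++ [x]) = Wc Nn l +
      (if Nn ≤ l.length + 1 ∧ (((l ++ [x]).drop (l.length + 1 - Nn)).all (fun x => x == 0)) then 1 else 0) := by
  by_cases hNn : Nn ≤ l.length + 1
  · unfold Wc
    simp only [List.length_append, List.length_singleton]
    have h2 : l.length + 1 + 1 - Nn = (l.length + 1 - Nn) + 1 := by omega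
    rw [h2, List.range_succ, List.countP_append]
    have hold : ∀ k ∈ List.range (l.length + 1 - Nn),
        ((((l ++ [x]).drop k).take Nn).all (fun y => y == 0)) = true ↔
        (((l.drop k).take Nn).all (fun y => y == 0)) = true := by
      intro k hk
      rw [List.mem_range] at hk
      rw [List.drop_append_of_le_length (by omega),
          List.take_append_of_le_length (by rw [List.length_drop]; omega)]
    rw [List.countP_congr hold]
    have hto : ((l ++ [x]).drop (l.length + 1 - Nn)).take Nn = (l ++ [x]).drop (l.length + 1 - Nn) :=
      List.take_of_length_le (by simp; omega)
    simp only [List.countP_cons, List.countP_nil, hto, hNn, true_and]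
    split_ifs <;> simp
  · have h0 : l.length + 1 + 1 - Nn = 0 := by omega
    have h1 : l.length + 1 - Nn = 0 := by omega
    unfold Wc
    simp only [List.length_append, List.length_singleton, h0, h1, List.range_zero,
      List.countP_nil, hNn, false_and, if_false]
    simp

lemma tz_le (l : List Int) : tz l ≤ l.length := by
  have h := (List.takeWhile_sublist (p := fun x : Int => x == 0) (l := l.reverse)).length_le
  simpa [tz] using h

lemma main_inv (N : Int) (hN : 0 ≤ N) (line : List Int) :
    (line.foldl (stepA N) ((0 : Int), (0 : Int))).2 = (tz line : Int) ∧
    (line.foldl (stepA N) ((0 : Int), (0 : Int))).1 + max 0 ((tz line : Int) - N + 1) = Wc N.toNat line := by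
  have hNN : (N.toNat : Int) = N := Int.toNat_of_nonneg hN
  induction line using List.reverseRecOn with
  | nil =>
      refine ⟨by simp [tz], ?_⟩
      unfold Wc tz
      by_cases h : N.toNat = 0
      · simp [h]; omega
      · have h1 : 1 - N.toNat = 0 := by omega
        simp [h1]; omega
  | append_singleton l x ih =>
      obtain ⟨ih1, ih2⟩ := ih
      have hfold : (l ++ [x]).foldl (stepA N) ((0 : Int), (0 : Int))
          = stepA N (l.foldl (stepA N) ((0 : Int), (0 : Int))) x := by
        rw [List.foldl_append]; rfl
      have htzl : tz l ≤ l.length := tz_le l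
      have hall : N.toNat ≤ l.length + 1 →
          (((l ++ [x]).drop (l.length + 1 - N.toNat)).all (fun y => y == 0))
            = decide (N.toNat ≤ tz (l ++ [x])) := by
        intro h
        have h2 := all_drop_iff_tz (l ++ [x]) N.toNat (by simp; omega)
        simpa using h2
      rw [hfold, Wc_append]
      by_cases hx : x = 0
      · have htz : tz (l ++ [x]) = tz l + 1 := by rw [tz_append]; simp [hx]
        have hstep : stepA N (l.foldl (stepA N) ((0 : Int), (0 : Int))) x
            = ((l.foldl (stepA N) ((0 : Int), (0 : Int))).1,
               (l.foldl (stepA N) ((0 : Int), (0 : Int))).2 + 1) := by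
          simp [stepA, hx]
        refine ⟨by simp [hstep, htz, ih1], ?_⟩
        rw [hstep, htz]
        by_cases hL : N.toNat ≤ l.length + 1
        · rw [hall hL, htz, ← ih2]
          split_ifs with h
          · obtain ⟨-, h⟩ := h
            simp only [decide_eq_true_eq] at h
            push_cast
            omega
          · rw [not_and_or] at h
            rcases h with h | h
            · omega
            · simp only [decide_eq_true_eq, not_le] at h
              push_cast
              omega
        · simp only [hL, false_and, if_false]
          rw [← ih2]
          push_cast
          omega
      · have htz : tz (l ++ [x]) = 0 := by rw [tz_append]; simp [hx]
        have hstep : stepA N (l.foldl (stepA N) ((0 : Int), (0 : Int))) x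
            = ((l.foldl (stepA N) ((0 : Int), (0 : Int))).1
                + max 0 ((l.foldl (stepA N) ((0 : Int), (0 : Int))).2 - N + 1), (0 : Int)) := by
          simp [stepA, hx]
        refine ⟨by rw [hstep, htz]; simp, ?_⟩
        rw [hstep, htz]
        by_cases hL : N.toNat ≤ l.length + 1
        · rw [hall hL, htz, ← ih2, ih1]
          split_ifs with h
          · obtain ⟨-, h⟩ := h
            simp only [decide_eq_true_eq, Nat.le_zero] at h
            push_cast
            omega
          · rw [not_and_or] at h
            rcases h with h | h
            · omega
            · simp only [decide_eq_true_eq, Nat.le_zero] at h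
              have : N.toNat ≠ 0 := h
              push_cast
              omega
        · simp only [hL, false_and, if_false]
          rw [← ih2, ih1]
          push_cast
          omega

lemma pfx_spec (line : List Int) :
    line.foldl (fun (pr : List Int) sq => pr ++ [PySem.List.pyGetD pr (-1) 0 + (if sq ≠ 0 then 1 else 0)]) [0]
      = (List.range (line.length + 1)).map
          (fun k => (((line.take k).countP (fun x => !(x == 0))) : Int)) := by
  induction line using List.reverseRecOn with
  | nil => simp
  | append_singleton l x ih =>
      rw [List.foldl_append, ih]
      simp only [List.foldl_cons, List.foldl_nil]
      have hlast : PySem.List.pyGetD ((List.range (l.length + 1)).map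
            (fun k => (((l.take k).countP (fun y => !(y == 0))) : Int))) (-1) 0
          = ((l.countP (fun y => !(y == 0))) : Int) := by
        rw [List.range_succ, List.map_append, List.map_cons, List.map_nil,
            PySem.List.pyGetD_neg_one_append_singleton, List.take_length]
      rw [hlast]
      have hlen : (l ++ [x]).length + 1 = (l.length + 1) + 1 := by simp
      rw [hlen]
      conv_rhs => rw [List.range_succ, List.map_append]
      refine congrArg₂ (fun a b : List Int => a ++ b) ?_ ?_
      · refine List.map_congr_left ?_
        intro k hk
        rw [List.mem_range] at hk
        rw [List.take_append_of_le_length (by omega)]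
      · simp only [List.map_cons, List.map_nil]
        have ht : (l ++ [x]).take (l.length + 1) = l ++ [x] :=
          List.take_of_length_le (by simp)
        rw [ht, List.countP_append]
        by_cases hx : x = 0 <;> simp [hx]

lemma lineCountAlt_eq_Wc (N : Int) (hN : 0 ≤ N) (line : List Int) :
    lineCountAlt N line = Wc N.toNat line := by
  have hNN : (N.toNat : Int) = N := Int.toNat_of_nonneg hN
  unfold lineCountAlt Wc
  rw [pfx_spec]
  simp only [PySem.List.pyRange_one, List.countP_map]
  have he : (((line.length : Int) - N + 1) - 0).toNat = line.length + 1 - N.toNat := by omega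
  rw [he]
  congr 1
  refine List.countP_congr ?_
  intro k hk
  rw [List.mem_range] at hk
  have hkN : (k : Int) + N = ((k + N.toNat : Nat) : Int) := by push_cast; omega
  have hk0 : (0 : Int) + (k : Int) = ((k : Nat) : Int) := by ring
  simp only [Function.comp, hkN, hk0, PySem.List.pyGetD_natCast]
  rw [PySem.List.getD_map_range _ _ _ _ (by omega), PySem.List.getD_map_range _ _ _ _ (by omega)]
  rw [List.take_add, List.countP_append]
  simp only [beq_iff_eq, List.all_eq_true]
  constructor
  · intro h y hy
    have h2 : (((line.drop k).take N.toNat).countP (fun x => !(x == 0))) = 0 := by omega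
    rw [List.countP_eq_zero] at h2
    have := h2 y hy
    simpa using this
  · intro h
    have h2 : (((line.drop k).take N.toNat).countP (fun x => !(x == 0))) = 0 := by
      rw [List.countP_eq_zero]
      intro y hy
      simpa using h y hy
    omega

lemma lineA_eq_alt (N : Int) (hN : 0 ≤ N) (p : Int) (line : List Int) :
    (let s := line.foldl (stepA N) (p, 0); s.1 + max 0 (s.2 - N + 1)) = p + lineCountAlt N line := by
  have h1 := foldl_stepA_shift N line p 0
  have h2 := main_inv N hN line
  have h3 := lineCountAlt_eq_Wc N hN line
  simp only [h1, h3]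
  omega

-- ===== VERDICT (by name: the statement is the Claim_ definition above) =====
theorem count_tile_positions_spec : Claim_equal_count_tile_positions := by
  intro N M board _ hPre
  obtain ⟨hN, -⟩ := hPre
  unfold Spec_count_tile_positions count_tile_positions count_tile_positions_alt
  have hline : ∀ (p : Int) (line : List Int),
      (let s := line.foldl (stepA N) (p, 0); s.1 + max 0 (s.2 - N + 1)) = p + lineCountAlt N line :=
    fun p line => lineA_eq_alt N hN p line
  have hrows : ∀ (b : List (List Int)) (t : Int),
      b.foldl (fun (p : Int) row =>
        let s := row.foldl (stepA N) (p, 0); s.1 + max 0 (s.2 - N + 1)) t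
      = b.foldl (fun (t : Int) row => t + lineCountAlt N row) t := by
    intro b
    induction b with
    | nil => intro t; rfl
    | cons r rs ih =>
        intro t
        simp only [List.foldl_cons]
        rw [hline t r]
        exact ih (t + lineCountAlt N r)
  have hcol : ∀ (p : Int) (col : Int),
      (let s := board.foldl (fun (s : Int × Int) row => stepA N s (PySem.List.pyGetD row col 0)) (p, 0)
       s.1 + max 0 (s.2 - N + 1))
      = p + lineCountAlt N (board.map (fun row => PySem.List.pyGetD row col 0)) := by
    intro p col
    rw [← List.foldl_map (f := fun row => PySem.List.pyGetD row col 0) (g := stepA N)]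
    exact hline p _
  have hcols : ∀ (cs : List Int) (t : Int),
      cs.foldl (fun (p : Int) col =>
        let s := board.foldl (fun (s : Int × Int) row => stepA N s (PySem.List.pyGetD row col 0)) (p, 0)
        s.1 + max 0 (s.2 - N + 1)) t
      = cs.foldl (fun (t : Int) c => t + lineCountAlt N (board.map (fun row => PySem.List.pyGetD row c 0))) t := by
    intro cs
    induction cs with
    | nil => intro t; rfl
    | cons c cs' ih =>
        intro t
        simp only [List.foldl_cons]
        rw [hcol t c]
        exact ih _
  rw [hrows]
  exact hcols _ _
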